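-- pv_equiv track=rewrite | github.com/aw449/Triple-Agonist-Peptide-Therapeutics-for-Metabolic-Disease | peptide_analysis.py | _parse_sequence_with_nsaa
-- ===== SOURCE A (Python) =====
-- def _parse_sequence_with_nsaa(sequence):
--     """Parse sequence handling NSAAs in brackets as single units."""
--     tokens = []
--     i = 0
--     while i < len(sequence):
--         if sequence[i] == '[':
--             # Find closing bracket
--             end = sequence.find(']', i)
--             if end != -1:
--                 tokens.append(sequence[i:end+1])
--                 i = end + 1
--             else:
--                 tokens.append(sequence[i])
--                 i += 1
--         else:
--             tokens.append(sequence[i])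
--             i += 1
--     return tokens
-- ===== SOURCE B (Python) =====
-- def _parse_sequence_with_nsaa(sequence):
--     """Parse sequence handling NSAAs in brackets as single units.
--
--     One-pass state machine: characters are buffered between '[' and the next
--     ']' into a single token; a buffer still open at the end of the string is
--     flushed as individual one-character tokens (no closing bracket exists, so
--     no later '[' can close either).
--     """
--     tokens = []
--     buf = None  # pending bracket token ('[' seen, no ']' yet), or None
--     for ch in sequence:
--         if buf is None:
--             if ch == '[':
--                 buf = '['
--             else:
--                 tokens.append(ch)
--         else:
--             buf += ch
--             if ch == ']':
--                 tokens.append(buf)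
--                 buf = None
--     if buf is not None:
--         tokens.extend(buf)
--     return tokens
-- ===== Notes on version B (the rewrite author's own statement) =====
-- stated objective: faster
-- what changed: Replaces A's index-walking scanner, which calls sequence.find(']', i) and slices for every bracket, by a single character-at-a-time state machine that buffers between an opening and the next closing bracket and flushes an unclosed buffer as one-character tokens.
import Mathlib
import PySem

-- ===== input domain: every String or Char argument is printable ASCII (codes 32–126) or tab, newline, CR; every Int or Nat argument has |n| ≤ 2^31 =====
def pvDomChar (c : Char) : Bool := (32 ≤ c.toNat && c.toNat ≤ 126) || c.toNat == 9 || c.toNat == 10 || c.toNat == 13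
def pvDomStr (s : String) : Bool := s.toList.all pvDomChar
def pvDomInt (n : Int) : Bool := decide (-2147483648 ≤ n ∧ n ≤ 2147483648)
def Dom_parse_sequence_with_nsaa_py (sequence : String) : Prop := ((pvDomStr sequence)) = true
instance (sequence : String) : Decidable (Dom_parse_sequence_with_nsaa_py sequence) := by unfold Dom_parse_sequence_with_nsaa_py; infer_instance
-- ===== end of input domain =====

-- B replaces A's index-walking scanner (with its substring `find` per '[') by a single
-- character-at-a-time state machine with a pending-bracket buffer (measured faster in a timing run); objective: faster.

-- ===== PORT A =====
-- A's while-loop over the index i, with tokens as accumulator; `sequence.find(']', i)`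
-- is PySem.Chars.findFrom, `sequence[i:end+1]` is PySem.Chars.slice.
def pvA_loop (s : List Char) (i : Nat) (tokens : List String) : List String :=
  if hi : i < s.length then
    if s[i] = '[' then
      if he : PySem.Chars.findFrom s [']'] (i : Int) none ≠ -1 then
        pvA_loop s ((PySem.Chars.findFrom s [']'] (i : Int) none).toNat + 1)
          (tokens ++ [String.ofList (PySem.Chars.slice s (some (i : Int))
            (some (PySem.Chars.findFrom s [']'] (i : Int) none + 1)))])
      else
        pvA_loop s (i + 1) (tokens ++ [String.ofList [s[i]]])
    else
      pvA_loop s (i + 1) (tokens ++ [String.ofList [s[i]]])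
  else tokens
termination_by s.length - i
decreasing_by
  · have h := PySem.Chars.findFrom_natCast_spec s [']'] i (Nat.le_of_lt hi) he
    omega
  · omega
  · omega

def parse_sequence_with_nsaa_py (sequence : String) : List String :=
  pvA_loop sequence.toList 0 []

-- ===== PORT B =====
-- B's loop body: state = (emitted tokens, optional pending bracket buffer).
def pvB_step (st : List String × Option (List Char)) (ch : Char) :
    List String × Option (List Char) :=
  match st.2 with
  | none => if ch = '[' then (st.1, some ['[']) else (st.1 ++ [String.ofList [ch]], none)
  | some buf =>
      let buf' := buf ++ [ch]
      if ch = ']' then (st.1 ++ [String.ofList buf'], none) else (st.1, some buf')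

-- B's final flush: an unclosed buffer becomes one-character tokens.
def pvB_finish (st : List String × Option (List Char)) : List String :=
  match st.2 with
  | none => st.1
  | some buf => st.1 ++ buf.map (fun c => String.ofList [c])

def parse_sequence_with_nsaa_py_alt (sequence : String) : List String :=
  pvB_finish (sequence.toList.foldl pvB_step ([], none))

-- ===== PRECONDITION & SPEC =====
def Spec_parse_sequence_with_nsaa_py (sequence : String) (out : List String) : Prop := out = parse_sequence_with_nsaa_py_alt sequence
instance (sequence : String) (out : List String) : Decidable (Spec_parse_sequence_with_nsaa_py sequence out) := by unfold Spec_parse_sequence_with_nsaa_py; infer_instance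

-- ===== CLAIM (what is proved, stated in full; the proofs are below) =====
def Claim_equal_parse_sequence_with_nsaa_py : Prop := ∀ (sequence : String), Dom_parse_sequence_with_nsaa_py sequence → Spec_parse_sequence_with_nsaa_py sequence (parse_sequence_with_nsaa_py sequence)

-- ===== LEMMAS AND PROOFS =====

-- Common reference tokenization both ports are reduced to.
def pvTok : List Char → List (List Char)
  | [] => []
  | c :: rest =>
    if c = '[' ∧ ']' ∈ rest then
      ('[' :: rest.takeWhile (· ≠ ']') ++ [']']) :: pvTok ((rest.dropWhile (· ≠ ']')).tail)
    else
      [c] :: pvTok rest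
termination_by s => s.length
decreasing_by
  · simp only [List.length_cons]
    have h1 : (rest.dropWhile (· ≠ ']')).length ≤ rest.length := List.length_dropWhile_le _ _
    have h2 : ((rest.dropWhile (· ≠ ']')).tail).length = (rest.dropWhile (· ≠ ']')).length - 1 :=
      List.length_tail
    omega
  · simp

lemma pvTok_no_bracket (u : List Char) (h : ']' ∉ u) : pvTok u = u.map (fun c => [c]) := by
  induction u with
  | nil => simp [pvTok]
  | cons c rest ih =>
      rw [pvTok]
      have : ¬ (c = '[' ∧ ']' ∈ rest) := by
        rintro ⟨-, hm⟩; exact h (List.mem_cons_of_mem _ hm)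
      rw [if_neg this, ih (fun hm => h (List.mem_cons_of_mem _ hm))]
      simp

lemma pv_tw_dw (m u : List Char) (hm : ']' ∉ m) :
    (m ++ ']' :: u).takeWhile (· ≠ ']') = m ∧ (m ++ ']' :: u).dropWhile (· ≠ ']') = ']' :: u := by
  induction m with
  | nil => simp
  | cons a m ih =>
      have ha : a ≠ ']' := fun h => hm (h ▸ List.mem_cons_self)
      obtain ⟨h1, h2⟩ := ih (fun h => hm (List.mem_cons_of_mem _ h))
      constructor
      · rw [List.cons_append, List.takeWhile_cons_of_pos (by simp [ha]), h1]
      · rw [List.cons_append, List.dropWhile_cons_of_pos (by simp [ha]), h2]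

-- A bracketed segment: the part of u before its first ']' contains no ']'.
lemma pv_takeWhile_not_mem (u : List Char) : ']' ∉ u.takeWhile (· ≠ ']') := fun hm => by
  simpa using List.mem_takeWhile_imp hm

lemma pv_split (u : List Char) (h : ']' ∈ u) :
    u = u.takeWhile (· ≠ ']') ++ ']' :: (u.dropWhile (· ≠ ']')).tail := by
  have hdw_ne : u.dropWhile (· ≠ ']') ≠ [] := by
    intro hnil
    have := List.dropWhile_eq_nil_iff.mp hnil _ h
    simp at this
  obtain ⟨d, dtl, hdw⟩ := List.exists_cons_of_ne_nil hdw_ne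
  have hd : d = ']' := by
    have h2 := List.head_dropWhile_not (fun x => decide (x ≠ ']')) hdw_ne
    simp only [hdw, List.head_cons] at h2
    simpa using h2
  conv_lhs => rw [← List.takeWhile_append_dropWhile (p := fun c => decide (c ≠ ']')) (l := u)]
  rw [hdw, hd]
  rfl

-- s.find(']') on tw ++ ']' :: dtl with ']' ∉ tw points at index tw.length.
lemma pv_find_append (tw dtl : List Char) (htw : ']' ∉ tw) :
    PySem.Chars.find (tw ++ ']' :: dtl) [']'] = (tw.length : Int) := by
  have h : ']' ∈ tw ++ ']' :: dtl := by simp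
  have hinf : [']'] <:+: tw ++ ']' :: dtl := (List.singleton_infix_iff ']' _).mpr h
  have h0 : 0 ≤ PySem.Chars.find (tw ++ ']' :: dtl) [']'] :=
    (PySem.Chars.find_nonneg_iff _ [']']).mpr hinf
  obtain ⟨hpre, hmin⟩ := PySem.Chars.find_spec h0
  set n := (PySem.Chars.find (tw ++ ']' :: dtl) [']']).toNat with hn
  have hle : n ≤ tw.length := by
    by_contra hgt
    push Not at hgt
    exact hmin tw.length hgt ⟨dtl, by simp⟩
  have hge : tw.length ≤ n := by
    by_contra hgt
    push Not at hgt
    obtain ⟨v, hv⟩ := hpre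
    rw [List.drop_append_of_le_length (Nat.le_of_lt hgt)] at hv
    obtain ⟨e, etl, he⟩ := List.exists_cons_of_ne_nil
      (l := tw.drop n) (by intro hnil; have := congrArg List.length hnil; simp at this; omega)
    rw [he] at hv
    have he_mem : e ∈ tw := List.mem_of_mem_drop (he ▸ List.mem_cons_self)
    have hev : (']' : Char) = e := by
      have := hv
      simp only [List.cons_append] at this
      exact (List.cons.injEq _ _ _ _).mp this |>.1
    exact htw (hev ▸ he_mem)
  have : n = tw.length := Nat.le_antisymm hle hge
  omega

lemma pvA_loop_eq (s : List Char) (i₀ : Nat) (tokens₀ : List String) (hi₀ : i₀ ≤ s.length) :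
    pvA_loop s i₀ tokens₀ = tokens₀ ++ (pvTok (s.drop i₀)).map String.ofList := by
  have H : ∀ n (i : Nat) (tokens : List String), s.length - i ≤ n → i ≤ s.length →
      pvA_loop s i tokens = tokens ++ (pvTok (s.drop i)).map String.ofList := by
    intro n
    induction n with
    | zero =>
        intro i tokens hn hi
        rw [pvA_loop, dif_neg (by omega)]
        rw [List.drop_eq_nil_of_le (by omega)]
        simp [pvTok]
    | succ n ih =>
        intro i tokens hn hi
        by_cases hlt : i < s.length
        · rw [pvA_loop, dif_pos hlt]
          have hdropi : s.drop i = s[i] :: s.drop (i + 1) := List.drop_eq_getElem_cons hlt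
          by_cases hbr : s[i] = '['
          · rw [if_pos hbr]
            rw [PySem.Chars.findFrom_natCast s [']'] i (Nat.le_of_lt hlt)]
            by_cases hmem : ']' ∈ s.drop (i + 1)
            · -- closing bracket found
              set a := (s.drop (i + 1)).takeWhile (· ≠ ']') with ha
              set b := ((s.drop (i + 1)).dropWhile (· ≠ ']')).tail with hb
              have hsplit : s.drop (i + 1) = a ++ ']' :: b := pv_split _ hmem
              have hna : ']' ∉ a := pv_takeWhile_not_mem _
              have hdropi' : s.drop i = ('[' :: a) ++ ']' :: b := by
                rw [hdropi, hbr, hsplit]; rfl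
              have hf : PySem.Chars.find (s.drop i) [']'] = ((a.length + 1 : Nat) : Int) := by
                rw [hdropi']
                have := pv_find_append ('[' :: a) b (by
                  intro hm
                  rcases List.mem_cons.mp hm with h | h
                  · exact absurd h.symm (by decide)
                  · exact hna h)
                simpa using this
              rw [hf]
              have hcond : ¬ (((a.length + 1 : Nat) : Int) = -1) := by omega
              rw [if_neg hcond]
              have hlen : i + a.length + 2 ≤ s.length := by
                have := congrArg List.length hdropi'
                simp [List.length_drop] at this
                omega
              rw [dif_pos (by omega : ¬ ((i : Int) + ((a.length + 1 : Nat) : Int) = -1))]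
              have hidx : ((i : Int) + ((a.length + 1 : Nat) : Int)).toNat + 1
                  = i + a.length + 2 := by omega
              have htok : PySem.Chars.slice s (some (i : Int))
                  (some ((i : Int) + ((a.length + 1 : Nat) : Int) + 1)) = '[' :: a ++ [']'] := by
                have hcast : (i : Int) + ((a.length + 1 : Nat) : Int) + 1
                    = ((i + (a.length + 2) : Nat) : Int) := by push_cast; ring
                rw [hcast]
                simp only [PySem.Chars.slice_eq_listSlice]
                rw [show ((i : Nat) : Int) = ((i : Nat) : Int) from rfl]
                rw [PySem.List.slice_natCast]
                rw [show i + (a.length + 2) - i = a.length + 2 from by omega]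
                rw [hdropi']
                rw [show a.length + 2 = ('[' :: a).length + 1 from by simp]
                rw [List.take_length_add_append]
                simp
              rw [htok, hidx]
              have hdrop2 : s.drop (i + a.length + 2) = b := by
                have : s.drop (i + a.length + 2) = (s.drop i).drop (a.length + 2) := by
                  rw [List.drop_drop]
                  congr 1
                rw [this, hdropi']
                rw [show a.length + 2 = ('[' :: a).length + 1 from by simp]
                rw [List.drop_length_add_append]
                rfl
              rw [ih (i + a.length + 2) _ (by omega) (by omega), hdrop2]
              conv_rhs => rw [hdropi]
              rw [pvTok]
              rw [if_pos ⟨hbr, hmem⟩]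
              rw [← ha, ← hb]
              simp
            · -- no closing bracket after i
              have hnone : PySem.Chars.find (s.drop i) [']'] = -1 := by
                rw [PySem.Chars.find_eq_neg_one_iff]
                rw [List.singleton_infix_iff]
                rw [hdropi, hbr]
                intro hm
                rcases List.mem_cons.mp hm with h | h
                · exact absurd h (by decide)
                · exact hmem h
              rw [hnone, if_pos rfl, dif_neg (by simp)]
              rw [ih (i + 1) _ (by omega) (by omega)]
              conv_rhs => rw [hdropi]
              rw [pvTok, if_neg (by rintro ⟨-, hm⟩; exact hmem hm)]
              simp
          · rw [if_neg hbr]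
            rw [ih (i + 1) _ (by omega) (by omega)]
            conv_rhs => rw [hdropi]
            rw [pvTok, if_neg (by rintro ⟨h1, -⟩; exact hbr h1)]
            simp
        · rw [pvA_loop, dif_neg hlt]
          rw [List.drop_eq_nil_of_le (by omega)]
          simp [pvTok]
  exact H (s.length - i₀) i₀ tokens₀ (Nat.le_refl _) hi₀

lemma pvB_eq (cs : List Char) :
    (∀ tokens, pvB_finish (cs.foldl pvB_step (tokens, none)) = tokens ++ (pvTok cs).map String.ofList) ∧
    (∀ tokens m, ']' ∉ m →
      pvB_finish (cs.foldl pvB_step (tokens, some ('[' :: m)))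
        = tokens ++ (pvTok ('[' :: (m ++ cs))).map String.ofList) := by
  induction cs with
  | nil =>
      constructor
      · intro tokens
        simp [pvB_finish, pvTok]
      · intro tokens m hm
        simp only [List.foldl_nil, pvB_finish, List.append_nil]
        rw [pvTok, if_neg (by rintro ⟨-, h2⟩; exact hm h2)]
        rw [pvTok_no_bracket m hm]
        simp [Function.comp]
  | cons c cs ih =>
      constructor
      · intro tokens
        simp only [List.foldl_cons]
        by_cases hc : c = '['
        · subst hc
          rw [show pvB_step (tokens, none) '[' = (tokens, some ['[']) from by simp [pvB_step]]
          simpa using ih.2 tokens [] (by simp)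
        · rw [show pvB_step (tokens, none) c = (tokens ++ [String.ofList [c]], none) from by
            simp [pvB_step, hc]]
          rw [ih.1]
          rw [pvTok, if_neg (by rintro ⟨h1, -⟩; exact hc h1)]
          simp
      · intro tokens m hm
        simp only [List.foldl_cons]
        by_cases hc : c = ']'
        · subst hc
          rw [show pvB_step (tokens, some ('[' :: m)) ']'
              = (tokens ++ [String.ofList ('[' :: m ++ [']'])], none) from by simp [pvB_step]]
          rw [ih.1]
          rw [pvTok, if_pos ⟨rfl, by simp⟩]
          rw [(pv_tw_dw m cs hm).1, (pv_tw_dw m cs hm).2]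
          simp
        · rw [show pvB_step (tokens, some ('[' :: m)) c = (tokens, some ('[' :: (m ++ [c]))) from by
            simp [pvB_step, hc]]
          rw [ih.2 tokens (m ++ [c]) (by
            intro hmem
            rcases List.mem_append.mp hmem with h | h
            · exact hm h
            · simp at h; exact hc h.symm)]
          simp

-- ===== VERDICT (by name: the statement is the Claim_ definition above) =====
theorem parse_sequence_with_nsaa_py_spec : Claim_equal_parse_sequence_with_nsaa_py := by
  intro s _
  unfold Spec_parse_sequence_with_nsaa_py parse_sequence_with_nsaa_py parse_sequence_with_nsaa_py_alt
  rw [pvA_loop_eq s.toList 0 [] (Nat.zero_le _), (pvB_eq s.toList).1 []]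
  simp
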